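-- pv_equiv track=rewrite | github.com/happycoder74/adventofcode | python/y2023/d05/aoc_2023_05.py | transform_source_range
-- ===== SOURCE A (Python) =====
-- def transform_source_range(source_range, destination_range):
--     source = []
--     dl = list()
--     for s, t in destination_range:
--         dl.append(s)
--         dl.append(t)
--
--     for s in source_range:
--         arr = []
--         dest_list = sorted(list(set(dl)))
--         arr.append(s[0])
--         value = s[0]
--         if dest_list:
--             while dest_list[0] < s[0]:
--                 value = dest_list.pop(0)
--                 if not dest_list:
--                     break
--             if dest_list:
--                 value = dest_list.pop(0)
--             if s[0] < value < s[1]: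
--                 arr.append(value)
--         if dest_list:
--             while dest_list[0] < s[1]:
--                 arr.append(dest_list.pop(0))
--                 if not dest_list:
--                     break
--         arr.append(s[1])
--         source += [(s, t) for s, t in zip(arr[:-1], arr[1:])]
--
--     return source
-- ===== SOURCE B (Python) =====
-- def transform_source_range(source_range, destination_range):
--     pts = sorted({x for pair in destination_range for x in pair})
--     result = []
--     for lo, hi in source_range:
--         cuts = [lo] + [p for p in pts if lo < p < hi] + [hi]
--         result.extend(zip(cuts, cuts[1:]))
--     return result
-- ===== Notes on version B (the rewrite author's own statement) =====
-- stated objective: faster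
-- what changed: B sorts the deduplicated boundary set once and, per source range, selects interior split points with a simple filter, replacing A's per-range re-sort of the full boundary list and its destructive pop(0)-based scanning with a tracked 'value' state.
import Mathlib
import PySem

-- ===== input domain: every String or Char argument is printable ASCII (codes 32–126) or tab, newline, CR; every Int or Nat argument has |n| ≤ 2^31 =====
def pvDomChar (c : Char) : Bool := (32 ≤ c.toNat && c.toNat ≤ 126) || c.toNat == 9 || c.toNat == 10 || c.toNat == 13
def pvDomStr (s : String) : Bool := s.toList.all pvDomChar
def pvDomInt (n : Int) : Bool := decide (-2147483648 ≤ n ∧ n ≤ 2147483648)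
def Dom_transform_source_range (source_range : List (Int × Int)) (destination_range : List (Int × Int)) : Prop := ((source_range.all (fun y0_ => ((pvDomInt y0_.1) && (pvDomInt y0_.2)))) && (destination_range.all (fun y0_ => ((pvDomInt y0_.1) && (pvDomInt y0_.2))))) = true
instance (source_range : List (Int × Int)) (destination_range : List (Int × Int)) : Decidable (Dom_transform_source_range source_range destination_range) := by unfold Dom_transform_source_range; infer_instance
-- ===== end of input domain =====

-- B sorts the deduplicated boundary set once and selects interior split points per range with a filter, instead of A's per-range re-sort and pop(0)-based scan (objective: faster; measured).

-- ===== PORT A =====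
-- while dest_list[0] < bound: value = dest_list.pop(0); if not dest_list: break
def pvPopLt : List Int → Int → Int → (List Int × Int)
  | [], _, value => ([], value)
  | d :: rest, bound, value =>
      if d < bound then
        match rest with
        | [] => ([], d)
        | _ :: _ => pvPopLt rest bound d
      else (d :: rest, value)

-- if dest_list: while dest_list[0] < bound: arr.append(dest_list.pop(0)); if not dest_list: break
def pvTakeLt : List Int → Int → List Int
  | [], _ => []
  | d :: rest, bound => if d < bound then d :: pvTakeLt rest bound else []

-- the per-source-range construction of `arr` in A's loop body
def pvArr (dest_list : List Int) (lo hi : Int) : List Int :=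
  let p1 : List Int × List Int :=
    match dest_list with
    | [] => ([], [lo])
    | _ :: _ =>
      let r := pvPopLt dest_list lo lo
      let q : List Int × Int :=
        match r.1 with
        | [] => ([], r.2)
        | d :: rest => (rest, d)
      (q.1, if lo < q.2 ∧ q.2 < hi then [lo, q.2] else [lo])
  (p1.2 ++ pvTakeLt p1.1 hi) ++ [hi]

def transform_source_range (source_range : List (Int × Int)) (destination_range : List (Int × Int)) : List (Int × Int) :=
  let dl : List Int := destination_range.foldl (fun dl st => dl ++ [st.1, st.2]) []
  source_range.foldl
    (fun source s =>
      let dest_list := PySem.List.sorted (PySem.Set.ofList dl) (fun x => x) false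
      let arr := pvArr dest_list s.1 s.2
      source ++ List.zip arr.dropLast (arr.drop 1))
    []

-- ===== PORT B =====
def transform_source_range_alt (source_range : List (Int × Int)) (destination_range : List (Int × Int)) : List (Int × Int) :=
  let pts := PySem.List.sorted (PySem.Set.ofList (destination_range.flatMap (fun pair => [pair.1, pair.2]))) (fun x => x) false
  source_range.foldl
    (fun result s =>
      let cuts := s.1 :: (pts.filter (fun p => decide (s.1 < p) && decide (p < s.2)) ++ [s.2])
      result ++ List.zip cuts (cuts.drop 1))
    []

-- ===== PRECONDITION & SPEC =====
def Spec_transform_source_range (source_range : List (Int × Int)) (destination_range : List (Int × Int)) (out : List (Int × Int)) : Prop := out = transform_source_range_alt source_range destination_range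
instance (source_range : List (Int × Int)) (destination_range : List (Int × Int)) (out : List (Int × Int)) : Decidable (Spec_transform_source_range source_range destination_range out) := by unfold Spec_transform_source_range; infer_instance

-- ===== CLAIM (what is proved, stated in full; the proofs are below) =====
def Claim_equal_transform_source_range : Prop := ∀ (source_range : List (Int × Int)) (destination_range : List (Int × Int)), Dom_transform_source_range source_range destination_range → Spec_transform_source_range source_range destination_range (transform_source_range source_range destination_range)

-- ===== LEMMAS AND PROOFS =====

theorem pvPopLt_fst (lo : Int) : ∀ (L : List Int) (v : Int),
    (pvPopLt L lo v).1 = L.dropWhile (fun d => decide (d < lo)) := by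
  intro L
  induction L with
  | nil => intro v; simp [pvPopLt]
  | cons d rest ih =>
    intro v
    by_cases h : d < lo
    · cases rest with
      | nil => simp [pvPopLt, h, List.dropWhile]
      | cons e t => simpa [pvPopLt, h, List.dropWhile] using ih d
    · simp [pvPopLt, h, List.dropWhile]

theorem pvPopLt_snd (lo : Int) : ∀ (L : List Int) (v : Int),
    (pvPopLt L lo v).2 = v ∨ (pvPopLt L lo v).2 < lo := by
  intro L
  induction L with
  | nil => intro v; simp [pvPopLt]
  | cons d rest ih =>
    intro v
    by_cases h : d < lo
    · cases rest with
      | nil => simp [pvPopLt, h]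
      | cons e t =>
        rcases ih d with h2 | h2
        · right; simp only [pvPopLt, if_pos h] at *; omega
        · right; simpa [pvPopLt, h] using h2
    · left; simp [pvPopLt, h]

theorem pvTakeLt_eq_filter (lo hi : Int) : ∀ (xs : List Int),
    xs.Pairwise (· < ·) → (∀ y ∈ xs, lo < y) →
    xs.filter (fun p => decide (lo < p) && decide (p < hi)) = pvTakeLt xs hi := by
  intro xs
  induction xs with
  | nil => intro _ _; simp [pvTakeLt]
  | cons x t ih =>
    intro hp hlo
    have hx : lo < x := hlo x (by simp)
    have hpt : t.Pairwise (· < ·) := hp.of_cons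
    have hgt : ∀ y ∈ t, x < y := fun y hy => (List.pairwise_cons.mp hp).1 y hy
    by_cases h : x < hi
    · have := ih hpt (fun y hy => lt_trans hx (hgt y hy))
      simp [pvTakeLt, h, hx, this]
    · have hnil : t.filter (fun p => decide (lo < p) && decide (p < hi)) = [] := by
        rw [List.filter_eq_nil_iff]
        intro y hy
        have : x < y := hgt y hy
        simp; omega
      simp [pvTakeLt, h, hnil]

theorem dropWhile_head_false {α : Type} (f : α → Bool) : ∀ (L : List α) (d : α) (rest : List α),
    L.dropWhile f = d :: rest → f d = false := by
  intro L
  induction L with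
  | nil => intro d rest h; simp [List.dropWhile] at h
  | cons a t ih =>
    intro d rest h
    by_cases hf : f a
    · rw [List.dropWhile_cons_of_pos hf] at h
      exact ih d rest h
    · rw [List.dropWhile_cons_of_neg hf] at h
      cases h
      simpa using hf

theorem pvArr_eq (L : List Int) (h : L.Pairwise (· < ·)) (lo hi : Int) :
    pvArr L lo hi = lo :: (L.filter (fun p => decide (lo < p) && decide (p < hi)) ++ [hi]) := by
  cases hL : L with
  | nil => simp [pvArr, pvTakeLt]
  | cons a L0 =>
    rw [← hL]
    have hPQ : L.takeWhile (fun d => decide (d < lo)) ++ L.dropWhile (fun d => decide (d < lo)) = L :=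
      List.takeWhile_append_dropWhile
    have hfiltP : (L.takeWhile (fun d => decide (d < lo))).filter (fun p => decide (lo < p) && decide (p < hi)) = [] := by
      rw [List.filter_eq_nil_iff]
      intro y hy
      have := List.mem_takeWhile_imp hy
      simp at this ⊢; omega
    have hfiltL : L.filter (fun p => decide (lo < p) && decide (p < hi))
        = (L.dropWhile (fun d => decide (d < lo))).filter (fun p => decide (lo < p) && decide (p < hi)) := by
      conv_lhs => rw [← hPQ]
      rw [List.filter_append, hfiltP, List.nil_append]
    have hfst := pvPopLt_fst lo L lo
    have hsnd := pvPopLt_snd lo L lo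
    cases hQ : L.dropWhile (fun d => decide (d < lo)) with
    | nil =>
      have hvle : ¬ (lo < (pvPopLt L lo lo).2 ∧ (pvPopLt L lo lo).2 < hi) := by
        rcases hsnd with h2 | h2 <;> omega
      simp only [pvArr, hL]
      rw [← hL]
      simp only [hfst, hQ, hvle]
      simp [pvTakeLt, hfiltL, hQ]
    | cons d rest =>
      have hdlo : ¬ (d < lo) := by
        have := dropWhile_head_false (fun x => decide (x < lo)) L d rest hQ
        simpa using this
      have hQpw : (d :: rest).Pairwise (· < ·) := by
        rw [← hQ]; exact h.sublist (List.dropWhile_sublist _)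
      have hgt : ∀ y ∈ rest, d < y := (List.pairwise_cons.mp hQpw).1
      have hrest : rest.filter (fun p => decide (lo < p) && decide (p < hi)) = pvTakeLt rest hi :=
        pvTakeLt_eq_filter lo hi rest hQpw.of_cons (fun y hy => by have := hgt y hy; omega)
      simp only [pvArr, hL]
      rw [← hL]
      simp only [hfst, hQ]
      rw [hfiltL, hQ, List.filter_cons]
      by_cases hc : lo < d ∧ d < hi
      · have : (decide (lo < d) && decide (d < hi)) = true := by simp; omega
        simp [hc, hrest]
      · have : (decide (lo < d) && decide (d < hi)) = true ↔ False := by simp; omega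
        simp only [this, if_false, if_neg hc]
        simp [hrest]

theorem zip_dropLast_drop {α : Type} : ∀ (xs : List α),
    List.zip xs.dropLast (xs.drop 1) = List.zip xs (xs.drop 1) := by
  intro xs
  induction xs with
  | nil => simp
  | cons a t ih =>
    cases t with
    | nil => simp
    | cons b t2 =>
      simp only [List.drop_one] at ih ⊢
      simp only [List.dropLast_cons₂, List.zip_cons_cons, List.tail_cons]
      have : List.zip (b :: t2).dropLast t2 = List.zip (b :: t2) t2 := by
        simpa using ih
      rw [this]

theorem dl_eq (destination_range : List (Int × Int)) :
    destination_range.foldl (fun dl (st : Int × Int) => dl ++ [st.1, st.2]) []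
      = destination_range.flatMap (fun pair => [pair.1, pair.2]) := by
  simpa using PySem.List.foldl_append_eq_flatMap (fun (st : Int × Int) => [st.1, st.2]) destination_range []

theorem fold_eq (pts : List Int) (hpw : pts.Pairwise (· < ·)) :
    ∀ (sr : List (Int × Int)) (acc : List (Int × Int)),
      sr.foldl (fun source s => source ++ List.zip (pvArr pts s.1 s.2).dropLast ((pvArr pts s.1 s.2).drop 1)) acc
        = sr.foldl (fun result s =>
            result ++ List.zip (s.1 :: (pts.filter (fun p => decide (s.1 < p) && decide (p < s.2)) ++ [s.2]))
              ((s.1 :: (pts.filter (fun p => decide (s.1 < p) && decide (p < s.2)) ++ [s.2])).drop 1)) acc := by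
  intro sr
  induction sr with
  | nil => intro acc; rfl
  | cons s t ih =>
    intro acc
    simp only [List.foldl_cons]
    rw [pvArr_eq pts hpw s.1 s.2, zip_dropLast_drop]
    exact ih _

-- ===== VERDICT (by name: the statement is the Claim_ definition above) =====
theorem transform_source_range_spec : Claim_equal_transform_source_range := by
  intro source_range destination_range _
  unfold Spec_transform_source_range transform_source_range transform_source_range_alt
  rw [dl_eq]
  exact fold_eq _ (PySem.List.sorted_ofList_pairwise_lt _) source_range []
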